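-- pv_equiv track=rewrite | github.com/bssrdf/pyleet | GroupsofStrings.py | groupStrings3
-- ===== SOURCE A (Python) =====
-- from typing import List
-- from collections import defaultdict,Counter
--
-- def groupStrings3(words: List[str]) -> List[int]:
--
--     w, n = words, len(words)
--     roots = [i for i in range(n)]
--     ranks = [0]*n
--     def find(x):
--         while x != roots[x]:
--             roots[x] = roots[roots[x]]
--             x = roots[x]
--         return x
--     def union(x, y):
--         fx, fy = find(x), find(y)
--         if fx != fy:
--             if ranks[fx] > ranks[fy]:
--                 roots[fy] = fx
--             else:
--                 roots[fx] = fy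
--                 if ranks[fx] == ranks[fy]:
--                     ranks[fy] += 1
--
--     M = {sum(1<<(ord(i) - ord("a")) for i in word): j for j, word in enumerate(w)}
--
--     masks = defaultdict(list)
--     for idx, word in enumerate(w):
--         vals = [ord(i) - ord("a") for i in word]
--         mask = sum(1<<i for i in vals)
--         for i in vals:
--             masks[mask - (1<<i) + (1<<26)].append(idx)
--             if mask - (1<<i) not in M: continue
--             idx2 = M[mask - (1<<i)]
--             union(idx, idx2)
--     for x in masks.values():
--         for a, b in zip(x, x[1:]):
--             union(a, b)
--
--     cnt = Counter()
--     for i in range(n):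
--        cnt[find(i)] += 1
--     return [len(cnt), max(cnt.values())]
-- ===== SOURCE B (Python) =====
-- # B: no union-find -- extract the same edge list (direct add/remove links via the mask
-- # dict M, plus consecutive pairs inside each delete-one-letter bucket), then compute the
-- # partition by label propagation: a label array relabelled wholesale on each merging edge.
-- from typing import List
-- from collections import Counter
--
--
-- def groupStrings3(words: List[str]) -> List[int]:
--     n = len(words)
--     M = {sum(1 << (ord(c) - ord("a")) for c in word): j for j, word in enumerate(words)}
--
--     buckets = {}
--     edges = []
--     for idx, word in enumerate(words):
--         vals = [ord(c) - ord("a") for c in word]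
--         mask = sum(1 << v for v in vals)
--         for v in vals:
--             buckets.setdefault(mask - (1 << v) + (1 << 26), []).append(idx)
--             if mask - (1 << v) in M:
--                 edges.append((idx, M[mask - (1 << v)]))
--     for x in buckets.values():
--         edges.extend(zip(x, x[1:]))
--
--     comp = list(range(n))
--     for a, b in edges:
--         ca, cb = comp[a], comp[b]
--         if ca != cb:
--             comp = [cb if c == ca else c for c in comp]
--
--     sizes = Counter(comp)
--     return [len(sizes), max(sizes.values())]
-- ===== Notes on version B (the rewrite author's own statement) =====
-- stated objective: alternative
-- what changed: Replaced the union-find (path compression + union by rank) with an explicit edge list extracted from the same mask dict and delete-one-letter buckets, and a label-propagation pass that relabels a component array wholesale on each merging edge; the two counts are read off the label array with a Counter.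
import Mathlib
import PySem

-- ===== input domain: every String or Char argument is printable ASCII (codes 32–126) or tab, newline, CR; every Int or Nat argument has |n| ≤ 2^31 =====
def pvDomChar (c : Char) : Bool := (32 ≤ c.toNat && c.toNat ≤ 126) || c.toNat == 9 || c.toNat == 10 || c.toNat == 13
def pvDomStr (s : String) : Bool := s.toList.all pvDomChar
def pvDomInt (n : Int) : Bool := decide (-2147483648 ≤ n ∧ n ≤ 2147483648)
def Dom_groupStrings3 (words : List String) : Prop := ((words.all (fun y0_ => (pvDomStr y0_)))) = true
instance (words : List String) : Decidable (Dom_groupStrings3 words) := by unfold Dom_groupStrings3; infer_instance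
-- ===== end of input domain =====

-- B replaces A's union-find by an explicit edge list + a label-propagation pass over a
-- component array (alternative decomposition, not faster); return values proved equal on Pre_.

-- ===== PORT A =====
-- shared pure helpers (identical expressions in both Pythons): 1 << v  (exact for v ≥ 0,
-- guaranteed by Pre_; Python raises ValueError for a negative shift), ord(c) - ord('a'),
-- the word mask sum, and the dict comprehension M.
def pyShl1 (v : Int) : Int := (1 : Int) <<< v.toNat
def wordVals (s : String) : List Int := s.toList.map (fun c => ((c.toNat : Int) - 97))
def wordMask (s : String) : Int := ((wordVals s).map pyShl1).sum
def mkM (words : List String) : PySem.Dict Int Int :=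
  (PySem.List.enumerate words 0).foldl (fun d p => d.insert (wordMask p.2) p.1) PySem.Dict.empty

-- find(x): the while loop, with fuel = len(roots) (a totality guard only; under Pre_ the
-- loop provably terminates within that many iterations, see rootDepth_lt below)
def ufFind (fuel : Nat) (roots : List Int) (x : Int) : Int × List Int :=
  match fuel with
  | 0 => (x, roots)
  | fuel + 1 =>
    let px := PySem.List.pyGetD roots x 0
    if x = px then (x, roots)
    else
      let g := PySem.List.pyGetD roots px 0       -- roots[roots[x]]
      ufFind fuel (PySem.List.pySetD roots x g) g -- roots[x] = g; x = roots[x]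

def ufUnion (roots ranks : List Int) (x y : Int) : List Int × List Int :=
  let r1 := ufFind roots.length roots x
  let fx := r1.1
  let r2 := ufFind r1.2.length r1.2 y
  let fy := r2.1
  let roots2 := r2.2
  if fx ≠ fy then
    if PySem.List.pyGetD ranks fx 0 > PySem.List.pyGetD ranks fy 0 then
      (PySem.List.pySetD roots2 fy fx, ranks)
    else
      (PySem.List.pySetD roots2 fx fy,
       if PySem.List.pyGetD ranks fx 0 = PySem.List.pyGetD ranks fy 0 then
         PySem.List.pySetD ranks fy (PySem.List.pyGetD ranks fy 0 + 1)
       else ranks)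
  else (roots2, ranks)

-- the body of A's main loop over enumerate(w): builds masks and performs the unions
def aInner (M : PySem.Dict Int Int) (idx mask : Int)
    (st : PySem.Dict Int (List Int) × List Int × List Int) (v : Int) :
    PySem.Dict Int (List Int) × List Int × List Int :=
  let ms := st.1.modify (mask - pyShl1 v + (1 <<< 26)) [] (fun l => l ++ [idx])
  if M.contains (mask - pyShl1 v) then
    let u := ufUnion st.2.1 st.2.2 idx (M.getD (mask - pyShl1 v) 0)
    (ms, u.1, u.2)
  else
    (ms, st.2.1, st.2.2)

def aStep (M : PySem.Dict Int Int)
    (st : PySem.Dict Int (List Int) × List Int × List Int) (p : Int × String) :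
    PySem.Dict Int (List Int) × List Int × List Int :=
  let vals := wordVals p.2
  let mask := (vals.map pyShl1).sum
  vals.foldl (aInner M p.1 mask) st

def groupStrings3 (words : List String) : List Int :=
  let n := words.length
  let roots0 := PySem.List.pyRange 0 (n : Int) 1
  let ranks0 : List Int := List.replicate n 0
  let M := mkM words
  let st := (PySem.List.enumerate words 0).foldl (aStep M) (PySem.Dict.empty, roots0, ranks0)
  let st2 := st.1.values.foldl
    (fun (rr : List Int × List Int) x =>
      (x.zip (PySem.List.slice x (some 1) none)).foldl
        (fun (rr : List Int × List Int) ab => ufUnion rr.1 rr.2 ab.1 ab.2) rr)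
    (st.2.1, st.2.2)
  let fin := (PySem.List.pyRange 0 (n : Int) 1).foldl
    (fun (s : PySem.Dict Int Int × List Int) i =>
      let f := ufFind s.2.length s.2 i
      (s.1.modify f.1 0 (fun c => c + 1), f.2))
    (PySem.Dict.empty, st2.1)
  -- max(cnt.values()): Python raises ValueError on an empty sequence; Pre_ gives words ≠ [],
  -- so the list is nonempty and the .getD 0 default is never read
  [ (fin.1.size : Int), (PySem.List.max? fin.1.values (fun v => v)).getD 0 ]

-- ===== PORT B =====
-- the body of B's first loop: builds the same buckets, records an edge where A unioned
def bInner (M : PySem.Dict Int Int) (idx mask : Int)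
    (st : PySem.Dict Int (List Int) × List (Int × Int)) (v : Int) :
    PySem.Dict Int (List Int) × List (Int × Int) :=
  let bk := st.1.modify (mask - pyShl1 v + (1 <<< 26)) [] (fun l => l ++ [idx])
  if M.contains (mask - pyShl1 v) then
    (bk, st.2 ++ [(idx, M.getD (mask - pyShl1 v) 0)])
  else
    (bk, st.2)

def bStep (M : PySem.Dict Int Int)
    (st : PySem.Dict Int (List Int) × List (Int × Int)) (p : Int × String) :
    PySem.Dict Int (List Int) × List (Int × Int) :=
  let vals := wordVals p.2
  let mask := (vals.map pyShl1).sum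
  vals.foldl (bInner M p.1 mask) st

-- one label-propagation step: relabel every entry of comp equal to comp[a] into comp[b]
def relabel (comp : List Int) (ab : Int × Int) : List Int :=
  let ca := PySem.List.pyGetD comp ab.1 0
  let cb := PySem.List.pyGetD comp ab.2 0
  if ca ≠ cb then comp.map (fun c => if c = ca then cb else c) else comp

def groupStrings3_alt (words : List String) : List Int :=
  let n := words.length
  let M := mkM words
  let st := (PySem.List.enumerate words 0).foldl (bStep M) (PySem.Dict.empty, [])
  let edges := st.1.values.foldl
    (fun es x => es ++ x.zip (PySem.List.slice x (some 1) none)) st.2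
  let comp := edges.foldl relabel (PySem.List.pyRange 0 (n : Int) 1)
  let sizes := PySem.Dict.counter comp
  -- same max(..) remark as in port A: nonempty under Pre_, default never read
  [ (sizes.size : Int), (PySem.List.max? sizes.values (fun v => v)).getD 0 ]

-- ===== PRECONDITION & SPEC =====
-- Pre_ excludes exactly the inputs where A raises ValueError: the empty list
-- (max() of an empty sequence) and any word with a character below 'a'
-- (1 << negative is a negative shift count); B raises there too.
def Pre_groupStrings3 (words : List String) : Prop :=
  words ≠ [] ∧ (words.all (fun s => s.toList.all (fun c => 97 ≤ c.toNat))) = true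
instance (words : List String) : Decidable (Pre_groupStrings3 words) := by
  unfold Pre_groupStrings3; infer_instance

def pvWitness_groupStrings3 : List String := ["ab", "b", "bc"]

def Spec_groupStrings3 (words : List String) (out : List Int) : Prop := out = groupStrings3_alt words
instance (words : List String) (out : List Int) : Decidable (Spec_groupStrings3 words out) := by
  unfold Spec_groupStrings3; infer_instance

-- ===== CLAIM (what is proved, stated in full; the proofs are below) =====
def Claim_equal_groupStrings3 : Prop := ∀ (words : List String), Dom_groupStrings3 words → Pre_groupStrings3 words → Spec_groupStrings3 words (groupStrings3 words)

-- ===== LEMMAS AND PROOFS =====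

-- ---- proof-layer definitions (ghost state: index ranges, parent chains, closures) ----
def InRn (n : Nat) (x : Int) : Prop := 0 ≤ x ∧ x < (n : Int)
def par (roots : List Int) (x : Int) : Int := PySem.List.pyGetD roots x 0
def rootF (roots : List Int) (k : Nat) (x : Int) : Int := (par roots)^[k] x
def isRt (roots : List Int) (x : Int) : Prop := par roots x = x
def GoodUF (n : Nat) (roots : List Int) : Prop :=
  roots.length = n ∧ (∀ x, InRn n x → InRn n (par roots x)) ∧
  (∀ x, InRn n x → ∃ k, isRt roots (rootF roots k x))
def rootOf (roots : List Int) (x : Int) : Int := rootF roots roots.length x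
def edgeRel (E : List (Int × Int)) (a b : Int) : Prop := (a, b) ∈ E
def Reps (n : Nat) (f : Int → Int) (E : List (Int × Int)) : Prop :=
  ∀ i j, InRn n i → InRn n j → (f i = f j ↔ Relation.EqvGen (edgeRel E) i j)
def EdgesOk (n : Nat) (es : List (Int × Int)) : Prop := ∀ p ∈ es, InRn n p.1 ∧ InRn n p.2
def Ufold (es : List (Int × Int)) (st : List Int × List Int) : List Int × List Int :=
  es.foldl (fun (rr : List Int × List Int) ab => ufUnion rr.1 rr.2 ab.1 ab.2) st
def lab (comp : List Int) (x : Int) : Int := PySem.List.pyGetD comp x 0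
def BucketsOk (n : Nat) (d : PySem.Dict Int (List Int)) : Prop :=
  d.keys.Nodup ∧ ∀ k i, i ∈ d.getD k [] → InRn n i
def firstReps (f : Int → Int) : List Int → List Int
  | [] => []
  | x :: l => x :: firstReps f (l.filter (fun y => f y != f x))
  termination_by l => l.length
  decreasing_by
    simp only [List.length_cons, List.length_unattach]
    exact Nat.lt_succ_of_le (le_trans (List.length_filter_le _ _) (by simp))

theorem egSymm {E : List (Int × Int)} {x y : Int} (h : Relation.EqvGen (edgeRel E) x y) :
    Relation.EqvGen (edgeRel E) y x := Relation.EqvGen.symm x y h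
theorem egTrans {E : List (Int × Int)} {x y z : Int} (h1 : Relation.EqvGen (edgeRel E) x y)
    (h2 : Relation.EqvGen (edgeRel E) y z) : Relation.EqvGen (edgeRel E) x z :=
  Relation.EqvGen.trans x y z h1 h2

theorem eqvGen_nil (i j : Int) : Relation.EqvGen (edgeRel []) i j ↔ i = j := by
  constructor
  · intro h
    induction h with
    | rel x y h => simp [edgeRel] at h
    | refl => rfl
    | symm x y _ ih => omega
    | trans x y z _ _ ih1 ih2 => omega
  · rintro rfl; exact Relation.EqvGen.refl i

theorem eqvGen_mono {E E' : List (Int × Int)} (hsub : ∀ p ∈ E, p ∈ E') {i j : Int}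
    (h : Relation.EqvGen (edgeRel E) i j) : Relation.EqvGen (edgeRel E') i j :=
  Relation.EqvGen.mono (fun a b hab => hsub (a, b) hab) h


theorem eqvGen_append_pair (E : List (Int × Int)) (a b i j : Int) :
    Relation.EqvGen (edgeRel (E ++ [(a, b)])) i j ↔
      Relation.EqvGen (edgeRel E) i j ∨
      (Relation.EqvGen (edgeRel E) i a ∧ Relation.EqvGen (edgeRel E) b j) ∨
      (Relation.EqvGen (edgeRel E) i b ∧ Relation.EqvGen (edgeRel E) a j) := by
  constructor
  · intro h
    induction h with
    | rel x y h =>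
      simp only [edgeRel, List.mem_append, List.mem_singleton, Prod.mk.injEq] at h
      rcases h with h | ⟨rfl, rfl⟩
      · exact Or.inl (Relation.EqvGen.rel _ _ h)
      · exact Or.inr (Or.inl ⟨Relation.EqvGen.refl _, Relation.EqvGen.refl _⟩)
    | refl => exact Or.inl (Relation.EqvGen.refl _)
    | symm x y _ ih =>
      rcases ih with h | ⟨h1, h2⟩ | ⟨h1, h2⟩
      · exact Or.inl (egSymm h)
      · exact Or.inr (Or.inr ⟨egSymm h2, egSymm h1⟩)
      · exact Or.inr (Or.inl ⟨egSymm h2, egSymm h1⟩)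
    | trans x y z _ _ ih1 ih2 =>
      rcases ih1 with h | ⟨h1, h2⟩ | ⟨h1, h2⟩ <;> rcases ih2 with g | ⟨g1, g2⟩ | ⟨g1, g2⟩
      · exact Or.inl (egTrans h g)
      · exact Or.inr (Or.inl ⟨egTrans h g1, g2⟩)
      · exact Or.inr (Or.inr ⟨egTrans h g1, g2⟩)
      · exact Or.inr (Or.inl ⟨h1, egTrans h2 g⟩)
      · exact Or.inl (egTrans h1 (egTrans (egSymm (egTrans h2 g1)) g2))
      · exact Or.inl (egTrans h1 g2)
      · exact Or.inr (Or.inr ⟨h1, egTrans h2 g⟩)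
      · exact Or.inl (egTrans h1 g2)
      · exact Or.inl (egTrans h1 (egTrans (egSymm (egTrans h2 g1)) g2))
  · have lift : ∀ {u v : Int}, Relation.EqvGen (edgeRel E) u v →
        Relation.EqvGen (edgeRel (E ++ [(a, b)])) u v :=
      fun h => eqvGen_mono (fun p hp => List.mem_append_left _ hp) h
    have hab : Relation.EqvGen (edgeRel (E ++ [(a, b)])) a b :=
      Relation.EqvGen.rel _ _ (List.mem_append_right _ (List.mem_singleton.mpr rfl))
    rintro (h | ⟨h1, h2⟩ | ⟨h1, h2⟩)
    · exact lift h
    · exact Relation.EqvGen.trans _ _ _ (Relation.EqvGen.trans _ _ _ (lift h1) hab) (lift h2)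
    · exact Relation.EqvGen.trans _ _ _ (Relation.EqvGen.trans _ _ _ (lift h1)
        (Relation.EqvGen.symm _ _ hab)) (lift h2)

theorem reps_congr {n : Nat} {f g : Int → Int} {E : List (Int × Int)}
    (h : ∀ x, InRn n x → f x = g x) (hf : Reps n f E) : Reps n g E := by
  intro i j hi hj
  rw [← h i hi, ← h j hj]; exact hf i j hi hj

theorem reps_relabel {n : Nat} {f : Int → Int} {E : List (Int × Int)} {a b : Int}
    (hf : Reps n f E) (ha : InRn n a) (hb : InRn n b) :
    Reps n (fun z => if f z = f a then f b else f z) (E ++ [(a, b)]) := by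
  intro i j hi hj
  rw [eqvGen_append_pair, ← hf i j hi hj, ← hf i a hi ha, ← hf b j hb hj,
    ← hf i b hi hb, ← hf a j ha hj]
  simp only []
  split_ifs <;> omega

theorem eqvGen_pair_comm (E : List (Int × Int)) (a b i j : Int) :
    Relation.EqvGen (edgeRel (E ++ [(b, a)])) i j ↔
      Relation.EqvGen (edgeRel (E ++ [(a, b)])) i j := by
  rw [eqvGen_append_pair, eqvGen_append_pair]; tauto

theorem reps_relabel_swap {n : Nat} {f : Int → Int} {E : List (Int × Int)} {a b : Int}
    (hf : Reps n f E) (ha : InRn n a) (hb : InRn n b) :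
    Reps n (fun z => if f z = f b then f a else f z) (E ++ [(a, b)]) := by
  intro i j hi hj
  rw [show (E ++ [(a, b)]) = (E ++ [(a,b)]) from rfl, ← eqvGen_pair_comm]
  exact reps_relabel hf hb ha i j hi hj

theorem reps_unchanged {n : Nat} {f : Int → Int} {E : List (Int × Int)} {a b : Int}
    (hf : Reps n f E) (ha : InRn n a) (hb : InRn n b) (hab : f a = f b) :
    Reps n f (E ++ [(a, b)]) := by
  have := reps_relabel hf ha hb
  exact reps_congr (fun x hx => by
    show (if f x = f a then f b else f x) = f x
    split_ifs with h <;> omega) this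


theorem rootF_zero (roots : List Int) (x : Int) : rootF roots 0 x = x := rfl
theorem rootF_succ (roots : List Int) (k : Nat) (x : Int) :
    rootF roots (k + 1) x = rootF roots k (par roots x) := Function.iterate_succ_apply (par roots) k x
theorem rootF_succ' (roots : List Int) (k : Nat) (x : Int) :
    rootF roots (k + 1) x = par roots (rootF roots k x) := Function.iterate_succ_apply' (par roots) k x
theorem rootF_add (roots : List Int) (k m : Nat) (x : Int) :
    rootF roots (k + m) x = rootF roots m (rootF roots k x) := by
  rw [rootF, Nat.add_comm, Function.iterate_add_apply]; rfl

theorem rootF_stable {roots : List Int} {r : Int} (h : isRt roots r) (k : Nat) :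
    rootF roots k r = r := by
  induction k with
  | zero => rfl
  | succ k ih => rw [rootF_succ', ih, h]

theorem root_unique {roots : List Int} {x : Int} {k m : Nat}
    (hk : isRt roots (rootF roots k x)) (hm : isRt roots (rootF roots m x)) :
    rootF roots k x = rootF roots m x := by
  rcases Nat.le_total k m with h | h
  · obtain ⟨d, rfl⟩ := Nat.exists_eq_add_of_le h
    rw [rootF_add, rootF_stable hk]
  · obtain ⟨d, rfl⟩ := Nat.exists_eq_add_of_le h
    rw [rootF_add, rootF_stable hm]

theorem rootF_inR {n : Nat} {roots : List Int} (hG : GoodUF n roots) {x : Int}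
    (hx : InRn n x) (k : Nat) : InRn n (rootF roots k x) := by
  induction k with
  | zero => exact hx
  | succ k ih => rw [rootF_succ']; exact hG.2.1 _ ih

-- pigeonhole: the minimal-depth prefix of the parent chain has no repeats, so depth < n
theorem depth_lt {n : Nat} {roots : List Int} (hG : GoodUF n roots) {x : Int}
    (hx : InRn n x) : ∃ k < n, isRt roots (rootF roots k x) := by
  obtain ⟨k0, hk0⟩ := hG.2.2 x hx
  have hex : ∃ k, isRt roots (rootF roots k x) := ⟨k0, hk0⟩
  classical
  let d := Nat.find hex
  have hd : isRt roots (rootF roots d x) := Nat.find_spec hex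
  refine ⟨d, ?_, hd⟩
  by_contra hnd
  push Not at hnd
  -- the list of toNats of the first d+1 chain elements is nodup, all < n
  have inj : ∀ a b, a ≤ d → b ≤ d → rootF roots a x = rootF roots b x → a = b := by
    intro a b ha hb heq
    by_contra hne
    rcases Nat.lt_or_ge a b with hab | hab
    · -- period b - a; root found at d - (b - a) < d
      have : rootF roots (a + (d - b)) x = rootF roots (b + (d - b)) x := by
        rw [rootF_add, rootF_add, heq]
      have hbd : b + (d - b) = d := by omega
      rw [hbd] at this
      have : isRt roots (rootF roots (a + (d - b)) x) := this ▸ hd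
      have := Nat.find_min hex (m := a + (d - b)) (by omega)
      exact this ‹isRt roots (rootF roots (a + (d - b)) x)›
    · rcases Nat.lt_or_ge b a with hba | hba
      · have : rootF roots (b + (d - a)) x = rootF roots (a + (d - a)) x := by
          rw [rootF_add, rootF_add, heq]
        have had : a + (d - a) = d := by omega
        rw [had] at this
        have : isRt roots (rootF roots (b + (d - a)) x) := this ▸ hd
        have := Nat.find_min hex (m := b + (d - a)) (by omega)
        exact this ‹isRt roots (rootF roots (b + (d - a)) x)›
      · omega
  have hnodup : ((List.range (d + 1)).map (fun t => (rootF roots t x).toNat)).Nodup := by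
    rw [List.nodup_map_iff_inj_on (List.nodup_range)]
    intro a ha b hb heq
    simp only [List.mem_range] at ha hb
    obtain ⟨ha0, ha1⟩ := rootF_inR hG hx a
    obtain ⟨hb0, hb1⟩ := rootF_inR hG hx b
    apply inj a b (by omega) (by omega)
    omega
  have hsub : ((List.range (d + 1)).map (fun t => (rootF roots t x).toNat)).toFinset ⊆ Finset.range n := by
    intro t ht
    simp only [List.mem_toFinset, List.mem_map, List.mem_range] at ht
    obtain ⟨a, _, rfl⟩ := ht
    obtain ⟨ha0, ha1⟩ := rootF_inR hG hx a
    simp only [Finset.mem_range]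
    omega
  have hcard := Finset.card_le_card hsub
  rw [List.toFinset_card_of_nodup hnodup] at hcard
  simp only [List.length_map, List.length_range, Finset.card_range] at hcard
  omega

theorem rootOf_spec {n : Nat} {roots : List Int} (hG : GoodUF n roots) {x : Int}
    (hx : InRn n x) :
    isRt roots (rootOf roots x) ∧
      ∀ k, isRt roots (rootF roots k x) → rootF roots k x = rootOf roots x := by
  obtain ⟨k, hk, hr⟩ := depth_lt hG hx
  have hlen : roots.length = n := hG.1
  have : rootF roots roots.length x = rootF roots k x := by
    have : roots.length = k + (roots.length - k) := by omega
    rw [this, rootF_add, rootF_stable hr]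
  constructor
  · rw [rootOf, this]; exact hr
  · intro m hm
    rw [rootOf, this]
    exact root_unique hm hr

theorem rootOf_inR {n : Nat} {roots : List Int} (hG : GoodUF n roots) {x : Int}
    (hx : InRn n x) : InRn n (rootOf roots x) := rootF_inR hG hx _

theorem rootOf_eq_of_reach {n : Nat} {roots : List Int} (hG : GoodUF n roots) {y r : Int}
    (hy : InRn n y) (hr : isRt roots r) {m : Nat} (hm : rootF roots m y = r) :
    rootOf roots y = r := by
  have := (rootOf_spec hG hy).2 m (by rw [hm]; exact hr)
  omega

theorem rootOf_par {n : Nat} {roots : List Int} (hG : GoodUF n roots) {y : Int}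
    (hy : InRn n y) : rootOf roots (par roots y) = rootOf roots y := by
  have h1 := (rootOf_spec hG hy).1
  have h2 : rootF roots (roots.length - 1 + 1) y = rootOf roots y := by
    rcases Nat.eq_zero_or_pos roots.length with h | h
    · -- n = 0 impossible: InRn n y with length = n... y < 0
      exfalso; rcases hy with ⟨hy0, hy1⟩; rw [hG.1] at h; omega
    · rw [show roots.length - 1 + 1 = roots.length by omega]; rfl
  rw [rootF_succ] at h2
  exact rootOf_eq_of_reach hG (hG.2.1 y hy) h1 h2

theorem isRt_rootOf {n : Nat} {roots : List Int} (hG : GoodUF n roots) {x : Int}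
    (hx : InRn n x) : isRt roots (rootOf roots x) := (rootOf_spec hG hx).1

theorem par_set {roots : List Int} {x : Int} (v : Int) {y : Int}
    (hx0 : 0 ≤ x) (hx1 : x < (roots.length : Int)) (hy0 : 0 ≤ y) (hy1 : y < (roots.length : Int)) :
    par (PySem.List.pySetD roots x v) y = if y = x then v else par roots y := by
  rw [par, par, PySem.List.pySetD_of_nonneg roots v hx0]
  rw [PySem.List.pyGetD_eq_getElem _ _ hy0 (by simpa using hy1),
      PySem.List.pyGetD_eq_getElem _ _ hy0 hy1]
  rw [List.getElem_set]
  by_cases h : y = x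
  · subst h; simp
  · rw [if_neg (by omega), if_neg h]

theorem length_pySetD' (roots : List Int) (x v : Int) :
    (PySem.List.pySetD roots x v).length = roots.length := PySem.List.length_pySetD roots x v

-- reach transport for path compression: roots' = roots with roots'[x] = grandparent of x
theorem compress_reach {n : Nat} {roots : List Int} (hG : GoodUF n roots) {x : Int}
    (hx : InRn n x) (hnr : ¬ isRt roots x) :
    ∀ (k : Nat) (y : Int), InRn n y → isRt roots (rootF roots k y) →
    ∃ m ≤ k, rootF (PySem.List.pySetD roots x (rootF roots 2 x)) m y = rootF roots k y := by
  have hlen := hG.1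
  have hps : ∀ y, InRn n y →
      par (PySem.List.pySetD roots x (rootF roots 2 x)) y =
        if y = x then rootF roots 2 x else par roots y := by
    intro y hy
    exact par_set _ hx.1 (by rw [hlen]; exact hx.2) hy.1 (by rw [hlen]; exact hy.2)
  intro k
  induction k using Nat.strong_induction_on with
  | _ k ih =>
    intro y hy hrt
    by_cases hyr : isRt roots y
    · refine ⟨0, Nat.zero_le _, ?_⟩
      rw [rootF_zero, rootF_stable hyr]
    · have hk1 : 1 ≤ k := by
        rcases Nat.eq_zero_or_pos k with rfl | h
        · exact absurd hrt hyr
        · exact h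
      by_cases hyx : y = x
      · subst hyx
        -- step to the grandparent g = rootF 2 y
        rcases Nat.lt_or_ge k 2 with hk2 | hk2
        · -- k = 1 : par y is a root, and g = par (par y) = par y
          have hk : k = 1 := by omega
          subst hk
          have hpr : isRt roots (par roots y) := hrt
          have h1 : rootF roots 1 y = par roots y := by
            rw [show (1 : Nat) = 0 + 1 by rfl, rootF_succ, rootF_zero]
          have hg : rootF roots 2 y = par roots y := by
            rw [show (2 : Nat) = 1 + 1 by rfl, rootF_succ', h1, hpr]
          refine ⟨1, le_refl _, ?_⟩
          rw [show (1 : Nat) = 0 + 1 by rfl, rootF_succ, rootF_zero, hps y hy, if_pos rfl, hg, h1]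
        · -- k ≥ 2: apply ih to g with k - 2
          have hgr : InRn n (rootF roots 2 y) := rootF_inR hG hy 2
          have hroot : isRt roots (rootF roots (k - 2) (rootF roots 2 y)) := by
            rw [← rootF_add]
            rw [show 2 + (k - 2) = k by omega]
            exact hrt
          obtain ⟨m, hm, hmeq⟩ := ih (k - 2) (by omega) (rootF roots 2 y) hgr hroot
          refine ⟨m + 1, by omega, ?_⟩
          rw [rootF_succ, hps y hy, if_pos rfl, hmeq, ← rootF_add,
            show 2 + (k - 2) = k by omega]
      · -- y ≠ x: one ordinary step
        have hpre : isRt roots (rootF roots (k - 1) (par roots y)) := by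
          rw [← rootF_succ, show k - 1 + 1 = k by omega]
          exact hrt
        obtain ⟨m, hm, hmeq⟩ := ih (k - 1) (by omega) (par roots y) (hG.2.1 y hy) hpre
        refine ⟨m + 1, by omega, ?_⟩
        rw [rootF_succ, hps y hy, if_neg hyx, hmeq, ← rootF_succ,
          show k - 1 + 1 = k by omega]

theorem isRt_compress {n : Nat} {roots : List Int} (hG : GoodUF n roots) {x : Int}
    (hx : InRn n x) (hnr : ¬ isRt roots x) {r : Int} (hr : isRt roots r) (hrn : InRn n r) :
    isRt (PySem.List.pySetD roots x (rootF roots 2 x)) r := by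
  have hlen := hG.1
  have hrx : r ≠ x := by intro h; exact hnr (h ▸ hr)
  rw [isRt, par_set _ hx.1 (by rw [hlen]; exact hx.2) hrn.1 (by rw [hlen]; exact hrn.2),
    if_neg hrx]
  exact hr

theorem compress_spec {n : Nat} {roots : List Int} (hG : GoodUF n roots) {x : Int}
    (hx : InRn n x) (hnr : ¬ isRt roots x) :
    GoodUF n (PySem.List.pySetD roots x (rootF roots 2 x)) ∧
    ∀ y, InRn n y → rootOf (PySem.List.pySetD roots x (rootF roots 2 x)) y = rootOf roots y := by
  have hlen := hG.1
  set roots' := PySem.List.pySetD roots x (rootF roots 2 x) with hr'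
  have hlen' : roots'.length = n := by rw [hr', length_pySetD', hlen]
  have hps : ∀ y, InRn n y → par roots' y = if y = x then rootF roots 2 x else par roots y := by
    intro y hy
    exact par_set _ hx.1 (by rw [hlen]; exact hx.2) hy.1 (by rw [hlen]; exact hy.2)
  have hG' : GoodUF n roots' := by
    refine ⟨hlen', ?_, ?_⟩
    · intro y hy
      rw [hps y hy]
      split
      · exact rootF_inR hG hx 2
      · exact hG.2.1 y hy
    · intro y hy
      obtain ⟨k, hk⟩ := hG.2.2 y hy
      obtain ⟨m, _, hmeq⟩ := compress_reach hG hx hnr k y hy hk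
      refine ⟨m, ?_⟩
      rw [hmeq]
      exact isRt_compress hG hx hnr hk (rootF_inR hG hy k)
  refine ⟨hG', ?_⟩
  intro y hy
  obtain ⟨k, hk⟩ := hG.2.2 y hy
  obtain ⟨m, _, hmeq⟩ := compress_reach hG hx hnr k y hy hk
  have : rootF roots k y = rootOf roots y := (rootOf_spec hG hy).2 k hk
  rw [this] at hmeq
  exact rootOf_eq_of_reach hG' hy
    (isRt_compress hG hx hnr (this ▸ hk) (this ▸ rootF_inR hG hy k)) hmeq

-- reach transport for linking two roots: roots' = roots with roots'[x] = v (x, v distinct roots)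
theorem link_reach {n : Nat} {roots : List Int} (hG : GoodUF n roots) {x v : Int}
    (hx : InRn n x) (hv : InRn n v) (hrx : isRt roots x) (hrv : isRt roots v) (hne : v ≠ x) :
    ∀ (k : Nat) (y : Int), InRn n y → isRt roots (rootF roots k y) →
    ∃ m, rootF (PySem.List.pySetD roots x v) m y =
      (if rootF roots k y = x then v else rootF roots k y) := by
  have hlen := hG.1
  have hps : ∀ y, InRn n y →
      par (PySem.List.pySetD roots x v) y = if y = x then v else par roots y := by
    intro y hy
    exact par_set _ hx.1 (by rw [hlen]; exact hx.2) hy.1 (by rw [hlen]; exact hy.2)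
  intro k
  induction k using Nat.strong_induction_on with
  | _ k ih =>
    intro y hy hrt
    by_cases hyr : isRt roots y
    · have hfy : rootF roots k y = y := rootF_stable hyr k
      rw [hfy]
      by_cases hyx : y = x
      · subst hyx
        refine ⟨1, ?_⟩
        rw [show (1:Nat) = 0 + 1 by rfl, rootF_succ, hps y hy, if_pos rfl, if_pos rfl,
          rootF_stable]
        rw [isRt, hps v hv, if_neg hne]
        exact hrv
      · refine ⟨0, ?_⟩
        rw [rootF_zero, if_neg hyx]
    · have hk1 : 1 ≤ k := by
        rcases Nat.eq_zero_or_pos k with rfl | h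
        · exact absurd hrt hyr
        · exact h
      have hyx : y ≠ x := by intro h; exact hyr (h ▸ hrx)
      have hpre : isRt roots (rootF roots (k - 1) (par roots y)) := by
        rw [← rootF_succ, show k - 1 + 1 = k by omega]
        exact hrt
      obtain ⟨m, hmeq⟩ := ih (k - 1) (by omega) (par roots y) (hG.2.1 y hy) hpre
      refine ⟨m + 1, ?_⟩
      rw [rootF_succ, hps y hy, if_neg hyx, hmeq, ← rootF_succ,
        show k - 1 + 1 = k by omega]

theorem link_spec {n : Nat} {roots : List Int} (hG : GoodUF n roots) {x v : Int}
    (hx : InRn n x) (hv : InRn n v) (hrx : isRt roots x) (hrv : isRt roots v) (hne : v ≠ x) :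
    GoodUF n (PySem.List.pySetD roots x v) ∧
    ∀ y, InRn n y → rootOf (PySem.List.pySetD roots x v) y =
      if rootOf roots y = x then v else rootOf roots y := by
  have hlen := hG.1
  set roots' := PySem.List.pySetD roots x v with hr'
  have hlen' : roots'.length = n := by rw [hr', length_pySetD', hlen]
  have hps : ∀ y, InRn n y → par roots' y = if y = x then v else par roots y := by
    intro y hy
    exact par_set _ hx.1 (by rw [hlen]; exact hx.2) hy.1 (by rw [hlen]; exact hy.2)
  have hrtv' : isRt roots' v := by
    rw [isRt, hps v hv, if_neg hne]; exact hrv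
  have hrt' : ∀ r, InRn n r → isRt roots r → r ≠ x → isRt roots' r := by
    intro r hrn hr hrne
    rw [isRt, hps r hrn, if_neg hrne]; exact hr
  have hG' : GoodUF n roots' := by
    refine ⟨hlen', ?_, ?_⟩
    · intro y hy
      rw [hps y hy]
      split
      · exact hv
      · exact hG.2.1 y hy
    · intro y hy
      obtain ⟨k, hk⟩ := hG.2.2 y hy
      obtain ⟨m, hmeq⟩ := link_reach hG hx hv hrx hrv hne k y hy hk
      refine ⟨m, ?_⟩
      rw [hmeq]
      split
      · exact hrtv'
      · exact hrt' _ (rootF_inR hG hy k) hk (by assumption)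
  refine ⟨hG', ?_⟩
  intro y hy
  obtain ⟨k, hk⟩ := hG.2.2 y hy
  obtain ⟨m, hmeq⟩ := link_reach hG hx hv hrx hrv hne k y hy hk
  have hkr : rootF roots k y = rootOf roots y := (rootOf_spec hG hy).2 k hk
  rw [hkr] at hmeq
  apply rootOf_eq_of_reach hG' hy _ hmeq
  split
  · exact hrtv'
  · exact hrt' _ (hkr ▸ rootF_inR hG hy k) (hkr ▸ hk) (by assumption)

theorem ufFind_spec {n : Nat} : ∀ (fuel : Nat) (roots : List Int) (x : Int),
    GoodUF n roots → InRn n x → (∃ k < fuel, isRt roots (rootF roots k x)) →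
    (ufFind fuel roots x).1 = rootOf roots x ∧ GoodUF n (ufFind fuel roots x).2 ∧
    ∀ y, InRn n y → rootOf (ufFind fuel roots x).2 y = rootOf roots y := by
  intro fuel
  induction fuel with
  | zero => intro roots x _ _ ⟨k, hk, _⟩; omega
  | succ fuel ih =>
    intro roots x hG hx hw
    obtain ⟨k, hkf, hk⟩ := hw
    by_cases hroot : x = PySem.List.pyGetD roots x 0
    · have hrt : isRt roots x := hroot.symm
      have h1 : ufFind (fuel + 1) roots x = (x, roots) := by
        rw [ufFind, if_pos hroot]
      rw [h1]
      refine ⟨?_, hG, fun y _ => rfl⟩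
      exact (rootOf_eq_of_reach hG hx hrt (m := 0) rfl).symm
    · have hnrt : ¬ isRt roots x := fun h => hroot h.symm
      have hk1 : 1 ≤ k := by
        rcases Nat.eq_zero_or_pos k with rfl | h
        · exact absurd hk hnrt
        · exact h
      have hpx : PySem.List.pyGetD roots x 0 = par roots x := rfl
      have hg : PySem.List.pyGetD roots (PySem.List.pyGetD roots x 0) 0 = rootF roots 2 x := by
        rw [hpx]
        show par roots (par roots x) = rootF roots 2 x
        rw [show (2 : Nat) = 1 + 1 by rfl, rootF_succ', show rootF roots 1 x = par roots x from
          Function.iterate_one (par roots) ▸ rfl]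
      have h1 : ufFind (fuel + 1) roots x =
          ufFind fuel (PySem.List.pySetD roots x (rootF roots 2 x)) (rootF roots 2 x) := by
        rw [ufFind, if_neg hroot, hg]
      rw [h1]
      set roots1 := PySem.List.pySetD roots x (rootF roots 2 x) with hr1
      obtain ⟨hG1, hpres⟩ := compress_spec hG hx hnrt
      have hgin : InRn n (rootF roots 2 x) := rootF_inR hG hx 2
      -- witness for the recursive call
      have hwit : ∃ k' < fuel, isRt roots1 (rootF roots1 k' (rootF roots 2 x)) := by
        rcases Nat.lt_or_ge k 2 with hk2 | hk2
        · -- k = 1: par x is a root, and rootF 2 x = par x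
          have hk' : k = 1 := by omega
          subst hk'
          have hpr : isRt roots (par roots x) := by
            have : rootF roots 1 x = par roots x := Function.iterate_one (par roots) ▸ rfl
            rw [← this]; exact hk
          have hg2 : rootF roots 2 x = par roots x := by
            rw [show (2 : Nat) = 1 + 1 by rfl, rootF_succ',
              show rootF roots 1 x = par roots x from Function.iterate_one (par roots) ▸ rfl, hpr]
          refine ⟨0, by omega, ?_⟩
          rw [rootF_zero, hg2]
          exact isRt_compress hG hx hnrt hpr (hG.2.1 x hx)
        · have hroot2 : isRt roots (rootF roots (k - 2) (rootF roots 2 x)) := by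
            rw [← rootF_add, show 2 + (k - 2) = k by omega]
            exact hk
          obtain ⟨m, hm, hmeq⟩ := compress_reach hG hx hnrt (k - 2) (rootF roots 2 x) hgin hroot2
          refine ⟨m, by omega, ?_⟩
          rw [hmeq]
          exact isRt_compress hG hx hnrt hroot2 (rootF_inR hG hgin (k - 2))
      obtain ⟨ha, hb, hc⟩ := ih roots1 (rootF roots 2 x) hG1 hgin hwit
      refine ⟨?_, hb, ?_⟩
      · rw [ha, hpres _ hgin]
        have e1 : rootOf roots (rootF roots 2 x) = rootOf roots x := by
          have t1 : rootF roots 2 x = par roots (par roots x) := by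
            rw [show (2 : Nat) = 1 + 1 by rfl, rootF_succ',
              show rootF roots 1 x = par roots x from Function.iterate_one (par roots) ▸ rfl]
          rw [t1, rootOf_par hG (hG.2.1 x hx), rootOf_par hG hx]
        exact e1
      · intro y hy
        rw [hc y hy, hpres y hy]

theorem ufUnion_reps {n : Nat} {roots ranks : List Int} {E : List (Int × Int)} {x y : Int}
    (hG : GoodUF n roots) (hx : InRn n x) (hy : InRn n y) (hR : Reps n (rootOf roots) E) :
    GoodUF n (ufUnion roots ranks x y).1 ∧
    Reps n (rootOf (ufUnion roots ranks x y).1) (E ++ [(x, y)]) := by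
  have hlen := hG.1
  have hw1 : ∃ k < roots.length, isRt roots (rootF roots k x) := by
    obtain ⟨k, hk, h⟩ := depth_lt hG hx
    exact ⟨k, by omega, h⟩
  obtain ⟨hfx, hG1, hp1⟩ := ufFind_spec roots.length roots x hG hx hw1
  set r1 := ufFind roots.length roots x with hr1
  have hlen1 : r1.2.length = n := hG1.1
  have hw2 : ∃ k < r1.2.length, isRt r1.2 (rootF r1.2 k y) := by
    obtain ⟨k, hk, h⟩ := depth_lt hG1 hy
    exact ⟨k, by omega, h⟩
  obtain ⟨hfy, hG2, hp2⟩ := ufFind_spec r1.2.length r1.2 y hG1 hy hw2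
  set r2 := ufFind r1.2.length r1.2 y with hr2
  have hfx' : r1.1 = rootOf roots x := hfx
  have hfy' : r2.1 = rootOf roots y := by rw [hfy, hp1 y hy]
  have hfxin : InRn n r1.1 := hfx' ▸ rootOf_inR hG hx
  have hfyin : InRn n r2.1 := hfy' ▸ rootOf_inR hG hy
  have hpres2 : ∀ z, InRn n z → rootOf r2.2 z = rootOf roots z := by
    intro z hz; rw [hp2 z hz, hp1 z hz]
  have hrt2x : isRt r2.2 r1.1 := by
    have : rootOf r2.2 r1.1 = r1.1 := by
      rw [hpres2 _ hfxin, hfx']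
      exact rootOf_eq_of_reach hG (rootOf_inR hG hx) (isRt_rootOf hG hx) (m := 0) rfl
    rw [← this]; exact isRt_rootOf hG2 hfxin
  have hrt2y : isRt r2.2 r2.1 := by
    have : rootOf r2.2 r2.1 = r2.1 := by
      rw [hpres2 _ hfyin, hfy']
      exact rootOf_eq_of_reach hG (rootOf_inR hG hy) (isRt_rootOf hG hy) (m := 0) rfl
    rw [← this]; exact isRt_rootOf hG2 hfyin
  have hreps2 : Reps n (rootOf r2.2) E := reps_congr (fun z hz => (hpres2 z hz).symm) hR
  show GoodUF n (ufUnion roots ranks x y).1 ∧ _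
  rw [ufUnion]
  simp only [← hr1, ← hr2]
  by_cases hne : r1.1 ≠ r2.1
  · rw [if_pos hne]
    by_cases hrank : PySem.List.pyGetD ranks r1.1 0 > PySem.List.pyGetD ranks r2.1 0
    · rw [if_pos hrank]
      obtain ⟨hG3, hroots3⟩ := link_spec hG2 hfyin hfxin hrt2y hrt2x hne
      refine ⟨hG3, ?_⟩
      apply reps_congr (g := rootOf (PySem.List.pySetD r2.2 r2.1 r1.1))
        (f := fun z => if rootOf roots z = rootOf roots y then rootOf roots x else rootOf roots z)
      · intro z hz
        rw [hroots3 z hz, hpres2 z hz, hfy', hfx']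
      · exact reps_relabel_swap hR hx hy
    · rw [if_neg hrank]
      obtain ⟨hG3, hroots3⟩ := link_spec hG2 hfxin hfyin hrt2x hrt2y (fun h => hne h.symm)
      refine ⟨hG3, ?_⟩
      apply reps_congr (g := rootOf (PySem.List.pySetD r2.2 r1.1 r2.1))
        (f := fun z => if rootOf roots z = rootOf roots x then rootOf roots y else rootOf roots z)
      · intro z hz
        rw [hroots3 z hz, hpres2 z hz, hfx', hfy']
      · exact reps_relabel hR hx hy
  · rw [if_neg hne]
    push Not at hne
    refine ⟨hG2, ?_⟩
    apply reps_congr (fun z hz => (hpres2 z hz).symm)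
    apply reps_unchanged hR hx hy
    rw [← hfx', ← hfy', hne]

theorem Ufold_reps {n : Nat} : ∀ (es : List (Int × Int)) (roots ranks : List Int) (E : List (Int × Int)),
    GoodUF n roots → EdgesOk n es → Reps n (rootOf roots) E →
    GoodUF n (Ufold es (roots, ranks)).1 ∧ Reps n (rootOf (Ufold es (roots, ranks)).1) (E ++ es) := by
  intro es
  induction es with
  | nil => intro roots ranks E hG _ hR; simpa [Ufold] using ⟨hG, hR⟩
  | cons e es ih =>
    intro roots ranks E hG hok hR
    obtain ⟨h1, h2⟩ := hok e (List.mem_cons_self)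
    obtain ⟨hG', hR'⟩ := ufUnion_reps (ranks := ranks) hG h1 h2 hR
    have hok' : EdgesOk n es := fun p hp => hok p (List.mem_cons_of_mem _ hp)
    have step : Ufold (e :: es) (roots, ranks) =
        Ufold es ((ufUnion roots ranks e.1 e.2).1, (ufUnion roots ranks e.1 e.2).2) := by
      simp [Ufold]
    rw [step]
    have := ih (ufUnion roots ranks e.1 e.2).1 (ufUnion roots ranks e.1 e.2).2 (E ++ [(e.1, e.2)])
      hG' hok' hR'
    rwa [List.append_assoc, List.singleton_append, show ((e.1, e.2) : Int × Int) = e from rfl] at this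

theorem par_pyRange {n : Nat} {x : Int} (hx : InRn n x) :
    par (PySem.List.pyRange 0 (n : Int) 1) x = x := by
  obtain ⟨h0, h1⟩ := hx
  have hlen : (PySem.List.pyRange 0 (n : Int) 1).length = n := by
    rw [PySem.List.length_pyRange_one]; omega
  rw [par, PySem.List.pyGetD_eq_getElem _ _ h0 (by rw [hlen]; exact h1)]
  rw [PySem.List.getElem_pyRange_one 0 (n : Int) x.toNat (by rw [hlen]; omega)]
  omega

theorem good_init (n : Nat) : GoodUF n (PySem.List.pyRange 0 (n : Int) 1) := by
  refine ⟨by rw [PySem.List.length_pyRange_one]; omega, ?_, ?_⟩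
  · intro x hx; rw [par_pyRange hx]; exact hx
  · intro x hx; exact ⟨0, by rw [isRt, rootF_zero, par_pyRange hx]⟩

theorem rootOf_init {n : Nat} {x : Int} (hx : InRn n x) :
    rootOf (PySem.List.pyRange 0 (n : Int) 1) x = x := by
  apply rootOf_eq_of_reach (good_init n) hx _ (m := 0) rfl
  show isRt (PySem.List.pyRange 0 (n : Int) 1) x
  rw [isRt, par_pyRange hx]

theorem reps_init (n : Nat) : Reps n (rootOf (PySem.List.pyRange 0 (n : Int) 1)) [] := by
  intro i j hi hj
  rw [rootOf_init hi, rootOf_init hj, eqvGen_nil]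


-- defs copied from the ports / proof layer
-- ---- B: label array semantics ----
theorem lab_map {n : Nat} {comp : List Int} (hlen : comp.length = n) (h : Int → Int) {z : Int}
    (hz : InRn n z) : lab (comp.map h) z = h (lab comp z) := by
  obtain ⟨h0, h1⟩ := hz
  rw [lab, lab, PySem.List.pyGetD_eq_getElem _ _ h0 (by simp [hlen]; omega),
    PySem.List.pyGetD_eq_getElem _ _ h0 (by rw [hlen]; omega), List.getElem_map]

theorem relabel_reps {n : Nat} {comp : List Int} {E : List (Int × Int)} {a b : Int}
    (hlen : comp.length = n) (ha : InRn n a) (hb : InRn n b) (hR : Reps n (lab comp) E) :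
    (relabel comp (a, b)).length = n ∧ Reps n (lab (relabel comp (a, b))) (E ++ [(a, b)]) := by
  rw [relabel]
  simp only []
  by_cases hne : PySem.List.pyGetD comp a 0 ≠ PySem.List.pyGetD comp b 0
  · rw [if_pos hne]
    refine ⟨by rw [List.length_map, hlen], ?_⟩
    apply reps_congr (g := lab (comp.map fun c => if c = PySem.List.pyGetD comp a 0
      then PySem.List.pyGetD comp b 0 else c))
      (f := fun z => if lab comp z = lab comp a then lab comp b else lab comp z)
    · intro z hz
      rw [lab_map hlen _ hz]
      rfl
    · exact reps_relabel hR ha hb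
  · rw [if_neg hne]
    push Not at hne
    exact ⟨hlen, reps_unchanged hR ha hb hne⟩

theorem relabel_fold_reps {n : Nat} : ∀ (es : List (Int × Int)) (comp : List Int) (E : List (Int × Int)),
    comp.length = n → EdgesOk n es → Reps n (lab comp) E →
    (es.foldl relabel comp).length = n ∧ Reps n (lab (es.foldl relabel comp)) (E ++ es) := by
  intro es
  induction es with
  | nil => intro comp E hlen _ hR; simpa using ⟨hlen, hR⟩
  | cons e es ih =>
    intro comp E hlen hok hR
    obtain ⟨h1, h2⟩ := hok e List.mem_cons_self
    obtain ⟨hlen', hR'⟩ := relabel_reps hlen h1 h2 hR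
    rw [List.foldl_cons, show relabel comp e = relabel comp (e.1, e.2) from rfl]
    have := ih (relabel comp (e.1, e.2)) (E ++ [(e.1, e.2)]) hlen'
      (fun p hp => hok p (List.mem_cons_of_mem _ hp)) hR'
    rwa [List.append_assoc, List.singleton_append, show ((e.1, e.2) : Int × Int) = e from rfl] at this

theorem comp_eq_map {n : Nat} {comp : List Int} (hlen : comp.length = n) :
    comp = (PySem.List.pyRange 0 (n : Int) 1).map (lab comp) := by
  apply List.ext_getElem
  · rw [List.length_map, PySem.List.length_pyRange_one]; omega
  · intro i hi1 hi2
    rw [List.getElem_map, PySem.List.getElem_pyRange_one 0 (n : Int) i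
      (by rwa [List.length_map] at hi2)]
    rw [lab, PySem.List.pyGetD_eq_getElem _ _ (by omega) (by rw [hlen]; omega)]
    congr 1
    omega

-- ---- the A loop is the B loop plus a union fold ----
theorem Ufold_nil (st : List Int × List Int) : Ufold [] st = st := rfl
theorem Ufold_append (es1 es2 : List (Int × Int)) (st : List Int × List Int) :
    Ufold (es1 ++ es2) st = Ufold es2 (Ufold es1 st) := by
  rw [Ufold, Ufold, Ufold, List.foldl_append]

theorem bInner_shift (M : PySem.Dict Int Int) (idx mask : Int) :
    ∀ (vals : List Int) (ms : PySem.Dict Int (List Int)) (es : List (Int × Int)),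
    vals.foldl (bInner M idx mask) (ms, es) =
      ((vals.foldl (bInner M idx mask) (ms, [])).1,
       es ++ (vals.foldl (bInner M idx mask) (ms, [])).2) := by
  intro vals
  induction vals with
  | nil => intro ms es; simp
  | cons v vals ih =>
    intro ms es
    rw [List.foldl_cons, List.foldl_cons]
    by_cases h : M.contains (mask - pyShl1 v) = true
    · rw [show bInner M idx mask (ms, es) v =
          ((ms.modify (mask - pyShl1 v + 1 <<< 26) [] fun l => l ++ [idx]),
            es ++ [(idx, M.getD (mask - pyShl1 v) 0)]) from by simp [bInner, h],
        show bInner M idx mask (ms, []) v =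
          ((ms.modify (mask - pyShl1 v + 1 <<< 26) [] fun l => l ++ [idx]),
            [(idx, M.getD (mask - pyShl1 v) 0)]) from by simp [bInner, h]]
      rw [ih _ (es ++ [(idx, M.getD (mask - pyShl1 v) 0)]),
        ih _ [(idx, M.getD (mask - pyShl1 v) 0)]]
      simp
    · rw [show bInner M idx mask (ms, es) v =
          ((ms.modify (mask - pyShl1 v + 1 <<< 26) [] fun l => l ++ [idx]), es) from by simp [bInner, h],
        show bInner M idx mask (ms, []) v =
          ((ms.modify (mask - pyShl1 v + 1 <<< 26) [] fun l => l ++ [idx]), []) from by simp [bInner, h]]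
      exact ih _ es

theorem bStep_shift1 (M : PySem.Dict Int Int) (p : Int × String)
    (ms : PySem.Dict Int (List Int)) (es : List (Int × Int)) :
    bStep M (ms, es) p = ((bStep M (ms, []) p).1, es ++ (bStep M (ms, []) p).2) := by
  rw [bStep]
  exact bInner_shift M p.1 _ _ ms es

theorem bStep_shift (M : PySem.Dict Int Int) :
    ∀ (L : List (Int × String)) (ms : PySem.Dict Int (List Int)) (es : List (Int × Int)),
    L.foldl (bStep M) (ms, es) =
      ((L.foldl (bStep M) (ms, [])).1, es ++ (L.foldl (bStep M) (ms, [])).2) := by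
  intro L
  induction L with
  | nil => intro ms es; simp
  | cons p L ih =>
    intro ms es
    rw [List.foldl_cons, List.foldl_cons, bStep_shift1 M p ms es,
      show bStep M (ms, []) p = ((bStep M (ms, []) p).1, (bStep M (ms, []) p).2) from rfl,
      ih _ (es ++ (bStep M (ms, []) p).2), ih _ ((bStep M (ms, []) p).2)]
    simp

theorem inner_decomp (M : PySem.Dict Int Int) (idx mask : Int) :
    ∀ (vals : List Int) (ms : PySem.Dict Int (List Int)) (rr : List Int × List Int),
    vals.foldl (aInner M idx mask) (ms, rr) =
      ((vals.foldl (bInner M idx mask) (ms, [])).1,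
       Ufold ((vals.foldl (bInner M idx mask) (ms, [])).2) rr) := by
  intro vals
  induction vals with
  | nil => intro ms rr; simp [Ufold_nil]
  | cons v vals ih =>
    intro ms rr
    rw [List.foldl_cons, List.foldl_cons]
    by_cases h : M.contains (mask - pyShl1 v) = true
    · rw [show aInner M idx mask (ms, rr) v =
          ((ms.modify (mask - pyShl1 v + 1 <<< 26) [] fun l => l ++ [idx]),
            ufUnion rr.1 rr.2 idx (M.getD (mask - pyShl1 v) 0)) from by simp [aInner, h],
        show bInner M idx mask (ms, []) v =
          ((ms.modify (mask - pyShl1 v + 1 <<< 26) [] fun l => l ++ [idx]),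
            [(idx, M.getD (mask - pyShl1 v) 0)]) from by simp [bInner, h]]
      rw [ih, bInner_shift M idx mask vals _ [(idx, M.getD (mask - pyShl1 v) 0)]]
      congr 1
    · rw [show aInner M idx mask (ms, rr) v =
          ((ms.modify (mask - pyShl1 v + 1 <<< 26) [] fun l => l ++ [idx]), rr) from by simp [aInner, h],
        show bInner M idx mask (ms, []) v =
          ((ms.modify (mask - pyShl1 v + 1 <<< 26) [] fun l => l ++ [idx]), []) from by simp [bInner, h]]
      exact ih _ rr

theorem outer_decomp (M : PySem.Dict Int Int) :
    ∀ (L : List (Int × String)) (ms : PySem.Dict Int (List Int)) (rr : List Int × List Int),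
    L.foldl (aStep M) (ms, rr) =
      ((L.foldl (bStep M) (ms, [])).1, Ufold ((L.foldl (bStep M) (ms, [])).2) rr) := by
  intro L
  induction L with
  | nil => intro ms rr; simp [Ufold_nil]
  | cons p L ih =>
    intro ms rr
    rw [List.foldl_cons, List.foldl_cons]
    rw [show aStep M (ms, rr) p =
      ((bStep M (ms, []) p).1, Ufold ((bStep M (ms, []) p).2) rr) from
      inner_decomp M p.1 _ (wordVals p.2) ms rr]
    rw [ih, show bStep M (ms, []) p = ((bStep M (ms, []) p).1, (bStep M (ms, []) p).2) from rfl,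
      bStep_shift M L _ ((bStep M (ms, []) p).2)]
    congr 1
    rw [Ufold_append]

theorem bucket_decomp : ∀ (vs : List (List Int)) (st : List Int × List Int),
    vs.foldl (fun (rr : List Int × List Int) x =>
        (x.zip (PySem.List.slice x (some 1) none)).foldl
          (fun (rr : List Int × List Int) ab => ufUnion rr.1 rr.2 ab.1 ab.2) rr) st =
      Ufold (vs.flatMap (fun x => x.zip (PySem.List.slice x (some 1) none))) st := by
  intro vs
  induction vs with
  | nil => intro st; simp [Ufold_nil]
  | cons x vs ih =>
    intro st
    rw [List.foldl_cons, List.flatMap_cons, Ufold_append]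
    rw [show (x.zip (PySem.List.slice x (some 1) none)).foldl
        (fun (rr : List Int × List Int) ab => ufUnion rr.1 rr.2 ab.1 ab.2) st =
        Ufold (x.zip (PySem.List.slice x (some 1) none)) st from rfl]
    exact ih _


theorem M_range (words : List String) :
    ∀ k, (mkM words).contains k = true → InRn words.length ((mkM words).getD k 0) := by
  have gen : ∀ (L : List (Int × String)) (d : PySem.Dict Int Int) (n : Nat),
      (∀ k, d.contains k = true → InRn n (d.getD k 0)) → (∀ p ∈ L, InRn n p.1) →
      ∀ k, (L.foldl (fun d p => d.insert (wordMask p.2) p.1) d).contains k = true →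
        InRn n ((L.foldl (fun d p => d.insert (wordMask p.2) p.1) d).getD k 0) := by
    intro L
    induction L with
    | nil => intro d n hd _ k; exact hd k
    | cons p L ih =>
      intro d n hd hL k
      rw [List.foldl_cons]
      apply ih _ n _ (fun q hq => hL q (List.mem_cons_of_mem _ hq))
      intro k' hk'
      rw [PySem.Dict.contains_insert] at hk'
      rw [PySem.Dict.getD_insert]
      by_cases he : k' = wordMask p.2
      · rw [if_pos he]; exact hL p List.mem_cons_self
      · rw [if_neg he]
        apply hd
        simp only [Bool.or_eq_true, beq_iff_eq] at hk'
        rcases hk' with h | h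
        · exact absurd h he
        · exact h
  intro k hk
  apply gen _ _ _ (fun k hk => by rw [PySem.Dict.contains_empty] at hk; exact absurd hk (by simp)) _ k hk
  intro p hp
  rw [PySem.List.mem_enumerate_iff] at hp
  obtain ⟨j, hj, rfl⟩ := hp
  exact ⟨by omega, by push_cast; omega⟩

theorem bucketsOk_modify {n : Nat} {d : PySem.Dict Int (List Int)} (h : BucketsOk n d)
    {idx : Int} (hidx : InRn n idx) (key : Int) :
    BucketsOk n (d.modify key [] (fun l => l ++ [idx])) := by
  obtain ⟨hnd, hin⟩ := h
  constructor
  · rw [PySem.Dict.keys_modify]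
    by_cases hc : d.contains key = true
    · rw [PySem.Dict.keys_insert_of_contains _ _ hc]; exact hnd
    · rw [PySem.Dict.keys_insert_of_not_contains _ _ (by simpa using hc)]
      simp only [List.nodup_append, List.nodup_singleton]
      refine ⟨hnd, by simp, ?_⟩
      intro a ha
      simp only [List.mem_singleton]
      intro b hb heq
      subst hb; subst heq
      exact absurd ((PySem.Dict.contains_iff_mem_keys d a).mpr ha) (by simpa using hc)
  · intro k i hi
    rw [PySem.Dict.getD_modify] at hi
    by_cases he : k = key
    · rw [if_pos he] at hi
      rcases List.mem_append.mp hi with h | h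
      · exact hin _ _ h
      · rw [List.mem_singleton] at h; subst h; exact hidx
    · rw [if_neg he] at hi
      exact hin _ _ hi

theorem bInner_pres {n : Nat} {M : PySem.Dict Int Int} {idx mask : Int}
    (hM : ∀ k, M.contains k = true → InRn n (M.getD k 0)) (hidx : InRn n idx) :
    ∀ (vals : List Int) (st : PySem.Dict Int (List Int) × List (Int × Int)),
    BucketsOk n st.1 → EdgesOk n st.2 →
    BucketsOk n (vals.foldl (bInner M idx mask) st).1 ∧
      EdgesOk n (vals.foldl (bInner M idx mask) st).2 := by
  intro vals
  induction vals with
  | nil => intro st h1 h2; exact ⟨h1, h2⟩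
  | cons v vals ih =>
    intro st h1 h2
    rw [List.foldl_cons]
    apply ih
    · have e1 : (bInner M idx mask st v).1 =
          st.1.modify (mask - pyShl1 v + (1 <<< 26)) [] (fun l => l ++ [idx]) := by
        rw [bInner]; split <;> rfl
      rw [e1]
      exact bucketsOk_modify h1 hidx _
    · rw [bInner]
      by_cases h : M.contains (mask - pyShl1 v) = true
      · simp only [h, if_pos]
        intro p hp
        rcases List.mem_append.mp hp with hm | hm
        · exact h2 p hm
        · rw [List.mem_singleton] at hm; subst hm
          exact ⟨hidx, hM _ h⟩
      · simp only [h, if_neg, Bool.false_eq_true, not_false_iff]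
        exact h2
theorem bFold_pres {n : Nat} {M : PySem.Dict Int Int}
    (hM : ∀ k, M.contains k = true → InRn n (M.getD k 0)) :
    ∀ (L : List (Int × String)) (st : PySem.Dict Int (List Int) × List (Int × Int)),
    (∀ p ∈ L, InRn n p.1) → BucketsOk n st.1 → EdgesOk n st.2 →
    BucketsOk n (L.foldl (bStep M) st).1 ∧ EdgesOk n (L.foldl (bStep M) st).2 := by
  intro L
  induction L with
  | nil => intro st _ h1 h2; exact ⟨h1, h2⟩
  | cons p L ih =>
    intro st hL h1 h2
    rw [List.foldl_cons]
    obtain ⟨g1, g2⟩ := bInner_pres hM (hL p List.mem_cons_self) (wordVals p.2) st h1 h2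
    exact ih _ (fun q hq => hL q (List.mem_cons_of_mem _ hq)) g1 g2

theorem values_ok {n : Nat} {d : PySem.Dict Int (List Int)} (h : BucketsOk n d) :
    ∀ x ∈ d.values, ∀ i ∈ x, InRn n i := by
  intro x hx i hi
  rw [PySem.Dict.values] at hx
  obtain ⟨⟨k, v⟩, hkv, rfl⟩ := List.mem_map.mp hx
  have hget := PySem.Dict.get?_of_mem_items d hkv h.1
  have := PySem.Dict.getD_of_get?_eq_some d ([] : List Int) hget
  exact h.2 k i (this ▸ hi)

theorem pairs_ok {n : Nat} {vs : List (List Int)} (h : ∀ x ∈ vs, ∀ i ∈ x, InRn n i) :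
    EdgesOk n (vs.flatMap (fun x => x.zip (PySem.List.slice x (some 1) none))) := by
  intro p hp
  rw [List.mem_flatMap] at hp
  obtain ⟨x, hx, hpz⟩ := hp
  rw [PySem.List.slice_from_one] at hpz
  have := List.of_mem_zip (show (p.1, p.2) ∈ x.zip x.tail from hpz)
  exact ⟨h x hx _ this.1, h x hx _ (List.mem_of_mem_tail this.2)⟩

theorem enumerate_fst_ok (words : List String) :
    ∀ p ∈ PySem.List.enumerate words 0, InRn words.length p.1 := by
  intro p hp
  rw [PySem.List.mem_enumerate_iff] at hp
  obtain ⟨j, hj, rfl⟩ := hp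
  exact ⟨by omega, by push_cast; omega⟩


theorem count_fold {n : Nat} : ∀ (l : List Int) (cnt : PySem.Dict Int Int) (roots : List Int),
    GoodUF n roots → (∀ i ∈ l, InRn n i) →
    (l.foldl (fun (s : PySem.Dict Int Int × List Int) i =>
        let f := ufFind s.2.length s.2 i
        (s.1.modify f.1 0 (fun c => c + 1), f.2)) (cnt, roots)).1 =
      (l.map (rootOf roots)).foldl (fun d k => d.modify k 0 (fun c => c + 1)) cnt := by
  intro l
  induction l with
  | nil => intro cnt roots _ _; rfl
  | cons i l ih =>
    intro cnt roots hG hl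
    have hi : InRn n i := hl i List.mem_cons_self
    have hw : ∃ k < roots.length, isRt roots (rootF roots k i) := by
      obtain ⟨k, hk, h⟩ := depth_lt hG hi
      rw [hG.1]
      exact ⟨k, hk, h⟩
    obtain ⟨hv, hG', hp⟩ := ufFind_spec roots.length roots i hG hi hw
    rw [List.foldl_cons, List.map_cons, List.foldl_cons]
    simp only []
    rw [hv]
    rw [ih _ _ hG' (fun j hj => hl j (List.mem_cons_of_mem _ hj))]
    congr 1
    apply List.map_congr_left
    intro j hj
    exact hp j (hl j (List.mem_cons_of_mem _ hj))

-- ---- kernel-equal label lists give identical Counter sizes and value lists ----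
theorem firstReps_subset {f : Int → Int} : ∀ (l : List Int), ∀ y ∈ firstReps f l, y ∈ l := by
  have gen : ∀ (N : Nat) (l : List Int), l.length ≤ N → ∀ y ∈ firstReps f l, y ∈ l := by
    intro N
    induction N with
    | zero =>
      intro l hl y hy
      match l, hl with
      | [], _ => exact absurd hy (by simp [firstReps])
    | succ N ih =>
      intro l hl y hy
      match l with
      | [] => exact absurd hy (by simp [firstReps])
      | x :: l =>
        rw [firstReps] at hy
        rcases List.mem_cons.mp hy with rfl | hy'
        · exact List.mem_cons_self
        · have := ih (l.filter (fun y => f y != f x))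
            (le_trans (List.length_filter_le _ _) (by simp at hl; omega)) y hy'
          exact List.mem_cons_of_mem _ (List.mem_of_mem_filter this)
  intro l
  exact gen l.length l (le_refl _)

theorem ofList_filter_ne {f : Int → Int} (v : Int) : ∀ (xs : List Int),
    (PySem.Set.ofList (xs.map f)).filter (fun y => y != f v) =
      PySem.Set.ofList ((xs.filter (fun y => f y != f v)).map f) := by
  intro xs
  induction xs with
  | nil => simp [PySem.Set.ofList_nil]
  | cons x xs ih =>
    rw [List.map_cons, PySem.Set.ofList_cons, List.filter_cons]
    by_cases h : (f x != f v) = true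
    · rw [if_pos h, List.filter_cons, if_pos h, List.map_cons, PySem.Set.ofList_cons, ← ih]
      rw [PySem.Set.discard, PySem.Set.discard]
      rw [List.filter_comm]
    · rw [if_neg h, List.filter_cons, if_neg h, ← ih, PySem.Set.discard]
      have he : f x = f v := by simpa using h
      rw [he, List.filter_filter]
      apply List.filter_congr
      intro y _
      simp [bne]

theorem ofList_map_firstReps (f : Int → Int) : ∀ (l : List Int),
    PySem.Set.ofList (l.map f) = (firstReps f l).map f := by
  have gen : ∀ (N : Nat) (l : List Int), l.length ≤ N →
      PySem.Set.ofList (l.map f) = (firstReps f l).map f := by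
    intro N
    induction N with
    | zero =>
      intro l hl
      match l, hl with
      | [], _ => simp [firstReps]
    | succ N ih =>
      intro l hl
      match l with
      | [] => simp [firstReps]
      | x :: l =>
        rw [List.map_cons, PySem.Set.ofList_cons, firstReps, List.map_cons]
        congr 1
        rw [PySem.Set.discard]
        have hd : (PySem.Set.ofList (List.map f l)).filter (fun y => !(y == f x)) =
            (PySem.Set.ofList (List.map f l)).filter (fun y => y != f x) :=
          List.filter_congr (fun y _ => by simp [bne])
        rw [hd, ofList_filter_ne x l, ih _ (le_trans (List.length_filter_le _ _) (by simp at hl; omega))]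
  intro l
  exact gen l.length l (le_refl _)

theorem firstReps_kernel {f g : Int → Int} : ∀ (l : List Int),
    (∀ x ∈ l, ∀ y ∈ l, (f x = f y ↔ g x = g y)) → firstReps f l = firstReps g l := by
  have gen : ∀ (N : Nat) (l : List Int), l.length ≤ N →
      (∀ x ∈ l, ∀ y ∈ l, (f x = f y ↔ g x = g y)) → firstReps f l = firstReps g l := by
    intro N
    induction N with
    | zero =>
      intro l hl _
      match l, hl with
      | [], _ => simp [firstReps]
    | succ N ih =>
      intro l hl h
      match l with
      | [] => simp [firstReps]
      | x :: l =>
        rw [firstReps, firstReps]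
        have hfil : l.filter (fun y => f y != f x) = l.filter (fun y => g y != g x) := by
          apply List.filter_congr
          intro y hy
          have := h y (List.mem_cons_of_mem _ hy) x List.mem_cons_self
          simp only [bne]
          by_cases hfy : f y = f x
          · simp [hfy, this.mp hfy]
          · have hgy : ¬ g y = g x := fun hg => hfy (this.mpr hg)
            simp [hfy, hgy]
        congr 1
        rw [hfil]
        apply ih _ (le_trans (List.length_filter_le _ _) (by simp at hl; omega))
        intro a ha b hb
        exact h a (List.mem_cons_of_mem _ (List.mem_of_mem_filter ha))
          b (List.mem_cons_of_mem _ (List.mem_of_mem_filter hb))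
  intro l h
  exact gen l.length l (le_refl _) h

theorem counter_kernel {f g : Int → Int} (l : List Int)
    (h : ∀ x ∈ l, ∀ y ∈ l, (f x = f y ↔ g x = g y)) :
    (PySem.Dict.counter (l.map f)).size = (PySem.Dict.counter (l.map g)).size ∧
    (PySem.Dict.counter (l.map f)).values = (PySem.Dict.counter (l.map g)).values := by
  have hfr := firstReps_kernel l h
  have hcnt : ∀ x ∈ firstReps f l,
      ((l.map f).count (f x) : Int) = ((l.map g).count (g x) : Int) := by
    intro x hx
    have hxl := firstReps_subset l x hx
    rw [List.count_eq_countP, List.count_eq_countP, List.countP_map, List.countP_map]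
    norm_cast
    apply List.countP_congr
    intro y hy
    simp only [Function.comp_apply, beq_iff_eq]
    exact h y hy x hxl
  constructor
  · rw [PySem.Dict.size, PySem.Dict.size, PySem.Dict.items_counter, PySem.Dict.items_counter,
      List.length_map, List.length_map, ofList_map_firstReps, ofList_map_firstReps,
      List.length_map, List.length_map, hfr]
  · rw [PySem.Dict.values, PySem.Dict.values, PySem.Dict.items_counter, PySem.Dict.items_counter]
    rw [List.map_map, List.map_map, ofList_map_firstReps, ofList_map_firstReps]
    rw [List.map_map, List.map_map, hfr]
    apply List.map_congr_left
    intro x hx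
    simp only [Function.comp_apply]
    rw [← hfr] at hx
    exact hcnt x hx


-- ---- the verdict ----
theorem main_eq (words : List String) : groupStrings3 words = groupStrings3_alt words := by
  rw [groupStrings3, groupStrings3_alt]
  simp only []
  -- abbreviations
  have hM := M_range words
  have hLok := enumerate_fst_ok words
  -- A's interleaved main loop = B's bucket/edge loop plus a union fold
  rw [outer_decomp (mkM words) (PySem.List.enumerate words 0) PySem.Dict.empty
    (PySem.List.pyRange 0 (words.length : Int) 1, List.replicate words.length 0)]
  rw [bucket_decomp]
  rw [show ((Ufold (List.foldl (bStep (mkM words)) (PySem.Dict.empty, [])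
      (PySem.List.enumerate words 0)).2
      (PySem.List.pyRange 0 (words.length : Int) 1, List.replicate words.length 0)).1,
    (Ufold (List.foldl (bStep (mkM words)) (PySem.Dict.empty, [])
      (PySem.List.enumerate words 0)).2
      (PySem.List.pyRange 0 (words.length : Int) 1, List.replicate words.length 0)).2) =
    Ufold (List.foldl (bStep (mkM words)) (PySem.Dict.empty, [])
      (PySem.List.enumerate words 0)).2
      (PySem.List.pyRange 0 (words.length : Int) 1, List.replicate words.length 0) from rfl]
  rw [← Ufold_append]
  -- B's edge list is the same list
  rw [PySem.List.foldl_append_eq_flatMap]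
  -- names
  set n := words.length with hn
  set stB := List.foldl (bStep (mkM words)) (PySem.Dict.empty, []) (PySem.List.enumerate words 0)
    with hstB
  set E := stB.2 ++ stB.1.values.flatMap (fun x => x.zip (PySem.List.slice x (some 1) none))
    with hE
  set rootsF := (Ufold E (PySem.List.pyRange 0 (n : Int) 1, List.replicate n 0)).1 with hrootsF
  set comp := List.foldl relabel (PySem.List.pyRange 0 (n : Int) 1) E with hcomp
  -- all edges have endpoints in [0, n)
  have hbf := bFold_pres (n := n) hM (PySem.List.enumerate words 0)
    (PySem.Dict.empty, []) hLok
    ⟨PySem.Dict.nodup_keys_empty, fun k i hi => by rw [PySem.Dict.getD_empty] at hi; cases hi⟩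
    (fun p hp => by cases hp)
  have hEok : EdgesOk n E := by
    intro p hp
    rcases List.mem_append.mp hp with h | h
    · exact hbf.2 p h
    · exact pairs_ok (values_ok hbf.1) p h
  -- the union-find side represents the closure of E
  have hUf := Ufold_reps (n := n) E (PySem.List.pyRange 0 (n : Int) 1) (List.replicate n 0) []
    (good_init n) hEok (reps_init n)
  rw [List.nil_append] at hUf
  -- the counting pass reads off rootOf
  have hcf := count_fold (n := n) (PySem.List.pyRange 0 (n : Int) 1) PySem.Dict.empty rootsF
    hUf.1 (fun i hi => by
      rw [PySem.List.mem_pyRange_one] at hi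
      exact ⟨hi.1, hi.2⟩)
  rw [hcf, ← PySem.Dict.counter_eq_foldl]
  -- the label side represents the same closure
  have hrel := relabel_fold_reps (n := n) E (PySem.List.pyRange 0 (n : Int) 1) []
    (by rw [PySem.List.length_pyRange_one]; omega) hEok
    (fun i j hi hj => by
      show par _ i = par _ j ↔ _
      rw [par_pyRange hi, par_pyRange hj, eqvGen_nil])
  rw [List.nil_append] at hrel
  -- read B's counter through the same map over range(n)
  rw [show PySem.Dict.counter comp =
    PySem.Dict.counter ((PySem.List.pyRange 0 (n : Int) 1).map (lab comp)) from by
      rw [← comp_eq_map hrel.1]]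
  -- equal kernels: identical sizes and value lists
  have hker : ∀ x ∈ PySem.List.pyRange 0 (n : Int) 1, ∀ y ∈ PySem.List.pyRange 0 (n : Int) 1,
      (rootOf rootsF x = rootOf rootsF y ↔ lab comp x = lab comp y) := by
    intro x hx y hy
    rw [PySem.List.mem_pyRange_one] at hx hy
    rw [hUf.2 x y ⟨hx.1, hx.2⟩ ⟨hy.1, hy.2⟩, hrel.2 x y ⟨hx.1, hx.2⟩ ⟨hy.1, hy.2⟩]
  have hck := counter_kernel (f := rootOf rootsF) (g := lab comp)
    (PySem.List.pyRange 0 (n : Int) 1) hker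
  rw [hck.1, hck.2]

-- ===== VERDICT (by name: the statement is the Claim_ definition above) =====
theorem groupStrings3_spec : Claim_equal_groupStrings3 := by
  intro words _ _
  exact main_eq words
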